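-- pv_equiv track=rewrite | github.com/developergaurav-exe/Mastering-python | Uncommon Alphabets.py | unique_array
-- ===== SOURCE A (Python) =====
-- def unique_array(input1, input2):
--     i,total1 = 0,0
--
--     for element in input2:
--         if element in input1:
--             input1.remove(element)
--
--     for element in input1:
--         total1 += ord(element)
--
--     return (total1 - 1) % 9 + 1 if total1 > 0 else 0
-- ===== SOURCE B (Python) =====
-- # Counter-based single pass: O(n+m) instead of A's O(n*m) remove loop.
-- # Note: unlike A, B does not mutate input1 in place; equivalence is about the return value.
-- def unique_array(input1, input2):
--     need = {}
--     for e in input2: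
--         need[e] = need.get(e, 0) + 1
--     total = 0
--     for ch in input1:
--         if need.get(ch, 0) > 0:
--             need[ch] = need.get(ch, 0) - 1
--         else:
--             total += ord(ch)
--     return (total - 1) % 9 + 1 if total > 0 else 0
-- ===== Notes on version B (the rewrite author's own statement) =====
-- stated objective: faster
-- what changed: Replaces the quadratic loop that repeatedly does membership test + list.remove on input1 with a hash-map multiset counter of input2 built once, then a single pass over input1 that skips counted elements and sums ords directly (B also does not mutate input1).
import Mathlib
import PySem

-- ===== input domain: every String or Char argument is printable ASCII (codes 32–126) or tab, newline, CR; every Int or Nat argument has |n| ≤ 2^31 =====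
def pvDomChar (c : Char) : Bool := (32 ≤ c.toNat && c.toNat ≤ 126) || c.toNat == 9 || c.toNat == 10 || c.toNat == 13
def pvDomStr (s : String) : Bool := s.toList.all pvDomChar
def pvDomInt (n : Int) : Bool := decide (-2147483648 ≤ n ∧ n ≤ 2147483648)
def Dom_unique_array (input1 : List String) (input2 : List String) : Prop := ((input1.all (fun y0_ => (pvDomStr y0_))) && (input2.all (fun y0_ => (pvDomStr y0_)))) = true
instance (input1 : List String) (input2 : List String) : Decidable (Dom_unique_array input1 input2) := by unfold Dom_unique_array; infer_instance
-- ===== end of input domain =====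

-- B replaces A's repeated membership-test + remove-first loop over input1 with a counter of
-- input2 built once and one pass over input1 (faster mechanism; B does not mutate input1 —
-- the equivalence proved here is about the return value only).


-- ===== PORT A =====
-- ord(s): exact when s has exactly one char (Pre_ guarantees that for every element ord is
-- applied to); Python raises TypeError otherwise, so those inputs are outside Pre_.
def pvOrd (s : String) : Int :=
  match s.toList with
  | [c] => (c.toNat : Int)
  | _ => 0

-- one iteration of A's first loop: `if element in input1: input1.remove(element)`
def pvRemoveStep (acc : List String) (e : String) : List String :=
  if acc.contains e then (PySem.List.remove? acc e).getD acc else acc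

def unique_array (input1 : List String) (input2 : List String) : Int :=
  let input1' := input2.foldl pvRemoveStep input1
  let total1 := input1'.foldl (fun t e => t + pvOrd e) 0
  if total1 > 0 then PySem.Int.mod (total1 - 1) 9 + 1 else 0

-- ===== PORT B =====
-- one iteration of B's single pass: skip if counted, else add ord
def pvBStep (st : PySem.Dict String Int × Int) (ch : String) : PySem.Dict String Int × Int :=
  if st.1.getD ch 0 > 0 then (st.1.insert ch (st.1.getD ch 0 - 1), st.2)
  else (st.1, st.2 + pvOrd ch)

def unique_array_alt (input1 : List String) (input2 : List String) : Int :=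
  let need := input2.foldl (fun d e => d.insert e (d.getD e 0 + 1)) PySem.Dict.empty
  let total := (input1.foldl pvBStep (need, 0)).2
  if total > 0 then PySem.Int.mod (total - 1) 9 + 1 else 0

-- ===== PRECONDITION & SPEC =====
-- Pre_ excludes exactly the inputs where Python A raises TypeError: some string of length ≠ 1
-- survives the removal loop (its multiplicity in input1 exceeds that in input2) and reaches ord.
def Pre_unique_array (input1 : List String) (input2 : List String) : Prop :=
  ∀ s ∈ input1, s.toList.length = 1 ∨ input1.count s ≤ input2.count s

instance (input1 : List String) (input2 : List String) : Decidable (Pre_unique_array input1 input2) := by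
  unfold Pre_unique_array; infer_instance

def pvWitness_unique_array : List String × List String := (["a", "b", "c"], ["b", "x"])

def Spec_unique_array (input1 : List String) (input2 : List String) (out : Int) : Prop := out = unique_array_alt input1 input2
instance (input1 : List String) (input2 : List String) (out : Int) : Decidable (Spec_unique_array input1 input2 out) := by unfold Spec_unique_array; infer_instance

-- ===== CLAIM (what is proved, stated in full; the proofs are below) =====
def Claim_equal_unique_array : Prop := ∀ (input1 : List String) (input2 : List String), Dom_unique_array input1 input2 → Pre_unique_array input1 input2 → Spec_unique_array input1 input2 (unique_array input1 input2)

-- ===== LEMMAS AND PROOFS =====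

-- B's second loop without the accumulator pair (proof-side view of pvBStep's total)
def pvB2 : List String → PySem.Dict String Int → Int
  | [], _ => 0
  | a :: l, d =>
    if d.getD a 0 > 0 then pvB2 l (d.insert a (d.getD a 0 - 1)) else pvOrd a + pvB2 l d

theorem pvB2_fold (l : List String) (d : PySem.Dict String Int) (t : Int) :
    (l.foldl pvBStep (d, t)).2 = t + pvB2 l d := by
  induction l generalizing d t with
  | nil => simp [pvB2]
  | cons a l ih =>
    simp only [List.foldl_cons, pvBStep, pvB2]
    split_ifs
    · rw [ih]
    · rw [ih]; ring

theorem pvB2_ext (l : List String) (d d' : PySem.Dict String Int)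
    (h : ∀ x, d.getD x 0 = d'.getD x 0) : pvB2 l d = pvB2 l d' := by
  induction l generalizing d d' with
  | nil => rfl
  | cons a l ih =>
    simp only [pvB2, h a]
    split_ifs with hgt
    · exact ih _ _ (fun x => by
        rw [PySem.Dict.getD_insert, PySem.Dict.getD_insert]
        split_ifs with hx
        · rfl
        · exact h x)
    · exact congrArg _ (ih _ _ h)

theorem pvB2_erase (l : List String) (d : PySem.Dict String Int) (e : String)
    (h : 0 ≤ d.getD e 0) :
    pvB2 (l.erase e) d = pvB2 l (d.insert e (d.getD e 0 + 1)) := by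
  induction l generalizing d with
  | nil => rfl
  | cons a l ih =>
    by_cases hae : a = e
    · subst hae
      rw [List.erase_cons_head]
      simp only [pvB2, PySem.Dict.getD_insert_self]
      rw [if_pos (by omega), PySem.Dict.insert_insert_self]
      refine (pvB2_ext l _ _ (fun x => ?_)).symm
      rw [PySem.Dict.getD_insert]
      split_ifs with hx
      · subst hx; omega
      · rfl
    · rw [List.erase_cons_tail (by simp [hae])]
      simp only [pvB2]
      rw [PySem.Dict.getD_insert_of_ne d _ _ hae]
      split_ifs with hgt
      · rw [ih _ (by rw [PySem.Dict.getD_insert_of_ne d _ _ (Ne.symm hae)]; exact h)]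
        refine pvB2_ext l _ _ (fun x => ?_)
        rw [PySem.Dict.getD_insert_of_ne d _ _ (Ne.symm hae)]
        exact PySem.Dict.getD_insert_insert_comm d _ _ hae x 0
      · exact congrArg _ (ih _ h)

-- A's removal step is erase-first-occurrence (no-op when absent)
theorem pvRemoveStep_eq_erase (l : List String) (e : String) :
    pvRemoveStep l e = l.erase e := by
  unfold pvRemoveStep
  by_cases hm : e ∈ l
  · rw [if_pos (by simpa using hm), PySem.List.remove?_eq_some_erase l e hm, Option.getD_some]
  · rw [if_neg (by simpa using hm), List.erase_of_not_mem hm]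

-- main bridge: A's remove loop then counting with d  =  counting with d plus input2's counts
theorem pv_main (l2 l1 : List String) (d : PySem.Dict String Int)
    (h : ∀ x, 0 ≤ d.getD x 0) :
    pvB2 (l2.foldl pvRemoveStep l1) d
      = pvB2 l1 (l2.foldl (fun d e => d.insert e (d.getD e 0 + 1)) d) := by
  induction l2 generalizing l1 d with
  | nil => rfl
  | cons e l2 ih =>
    simp only [List.foldl_cons]
    rw [ih _ d h, pvRemoveStep_eq_erase,
        pvB2_erase l1 _ e (by rw [PySem.Dict.getD_foldl_insert_add_one]; have := h e; omega)]
    refine pvB2_ext l1 _ _ (fun x => ?_)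
    rw [PySem.Dict.getD_insert, PySem.Dict.getD_foldl_insert_add_one,
        PySem.Dict.getD_foldl_insert_add_one, PySem.Dict.getD_foldl_insert_add_one,
        PySem.Dict.getD_insert]
    split_ifs with hx
    · subst hx; omega
    · rfl

-- A's sum-of-ords loop equals pvB2 with the empty counter (nothing is ever skipped)
theorem pv_sum (l : List String) (t : Int) :
    l.foldl (fun t e => t + pvOrd e) t = t + pvB2 l PySem.Dict.empty := by
  induction l generalizing t with
  | nil => simp [pvB2]
  | cons a l ih =>
    simp only [List.foldl_cons, pvB2, PySem.Dict.getD_empty]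
    rw [if_neg (by omega), ih]
    ring

-- ===== VERDICT (by name: the statement is the Claim_ definition above) =====
theorem unique_array_spec : Claim_equal_unique_array := by
  intro input1 input2 _ _
  unfold Spec_unique_array unique_array unique_array_alt
  have h1 : ((input2.foldl pvRemoveStep input1).foldl (fun t e => t + pvOrd e) 0)
      = (input1.foldl pvBStep
          (input2.foldl (fun d e => d.insert e (d.getD e 0 + 1)) PySem.Dict.empty, 0)).2 := by
    rw [pv_sum, pvB2_fold, zero_add, zero_add,
        pv_main input2 input1 PySem.Dict.empty (fun x => by simp [PySem.Dict.getD_empty])]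
  simp only [h1]
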